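-- pv_equiv track=rewrite | github.com/Jorge-Luques/repo_python | strCursera.py | ocurrencias
-- ===== SOURCE A (Python) =====
-- def ocurrencias(string):
--     cont1s = 0
--     cont0s = 0
--     for i in range(len(string)):
--         if string[i] == "1":
--             cont1s += 1
--         else:
--             cont0s += 1
--     return cont1s - cont0s
-- ===== SOURCE B (Python) =====
-- def ocurrencias(string):
--     # split on "1": number of '1's = len(parts) - 1, non-'1' chars = total length of parts
--     parts = string.split("1")
--     return (len(parts) - 1) - sum(map(len, parts))
-- ===== Notes on version B (the rewrite author's own statement) =====
-- stated objective: alternative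
-- what changed: Instead of scanning character by character with two counters, B splits the string on the separator "1": the number of '1' characters is len(parts)-1 and the non-'1' characters are exactly the characters left in the parts, so the result is (len(parts)-1) - sum(map(len, parts)); the split and sum run in C, removing the per-character Python loop.
import Mathlib
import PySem

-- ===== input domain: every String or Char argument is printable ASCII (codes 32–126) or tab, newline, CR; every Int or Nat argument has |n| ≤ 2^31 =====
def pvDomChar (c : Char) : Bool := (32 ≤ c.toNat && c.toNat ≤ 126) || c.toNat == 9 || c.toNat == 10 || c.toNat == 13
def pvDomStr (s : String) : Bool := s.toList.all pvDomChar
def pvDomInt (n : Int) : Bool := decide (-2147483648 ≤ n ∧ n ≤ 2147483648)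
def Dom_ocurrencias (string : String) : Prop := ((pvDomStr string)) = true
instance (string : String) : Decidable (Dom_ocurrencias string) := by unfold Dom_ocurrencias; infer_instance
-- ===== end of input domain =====

-- B splits the string on "1" and derives the result from the parts (alternative algorithm, same cost).

-- ===== PORT A =====
def ocurrencias (string : String) : Int :=
  let p : Int × Int :=
    (PySem.List.pyRange 0 (PySem.Str.len string) 1).foldl
      (fun (acc : Int × Int) i =>
        if PySem.List.pyGetD string.toList i ' ' == '1' then (acc.1 + 1, acc.2)
        else (acc.1, acc.2 + 1))
      (0, 0)
  p.1 - p.2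

-- ===== PORT B =====
def ocurrencias_alt (string : String) : Int :=
  let parts := PySem.Chars.splitOn string.toList "1".toList
  ((parts.length : Int) - 1) - (parts.map (fun p => (p.length : Int))).sum

-- ===== PRECONDITION & SPEC =====
def Spec_ocurrencias (string : String) (out : Int) : Prop := out = ocurrencias_alt string
instance (string : String) (out : Int) : Decidable (Spec_ocurrencias string out) := by unfold Spec_ocurrencias; infer_instance

-- ===== CLAIM (what is proved, stated in full; the proofs are below) =====
def Claim_equal_ocurrencias : Prop := ∀ (string : String), Dom_ocurrencias string → Spec_ocurrencias string (ocurrencias string)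

-- ===== LEMMAS AND PROOFS =====

-- Reference split-by-'1' function used only inside the proofs.
def pvSp : List Char → List (List Char)
  | [] => [[]]
  | c :: t =>
    if c = '1' then [] :: pvSp t
    else
      match pvSp t with
      | p :: ps => (c :: p) :: ps
      | [] => [[c]]

theorem pvSp_ne_nil (l : List Char) : pvSp l ≠ [] := by
  cases l with
  | nil => simp [pvSp]
  | cons c t =>
    simp only [pvSp]
    split_ifs
    · simp
    · cases h : pvSp t <;> simp

-- PySem's fuel-based splitOn.go with separator "1" computes pvSp (with cur/acc threaded through).
theorem splitOn_go_one (l : List Char) : ∀ (fuel : Nat) (cur : List Char) (acc : List (List Char)),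
    l.length < fuel →
    PySem.Chars.splitOn.go ['1'] fuel l cur acc
      = acc.reverse ++ (match pvSp l with
          | p :: ps => (cur.reverse ++ p) :: ps
          | [] => [cur.reverse]) := by
  induction l with
  | nil =>
    intro fuel cur acc h
    match fuel with
    | 0 => omega
    | fuel + 1 => simp [PySem.Chars.splitOn.go, pvSp]
  | cons c t ih =>
    intro fuel cur acc h
    match fuel with
    | 0 => omega
    | fuel + 1 =>
      by_cases hc : c = '1'
      · subst hc
        have hpre : List.isPrefixOf ['1'] ('1' :: t) = true := by
          simp [List.isPrefixOf]
        have : PySem.Chars.splitOn.go ['1'] (fuel + 1) ('1' :: t) cur acc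
            = PySem.Chars.splitOn.go ['1'] fuel (List.drop 1 ('1' :: t)) [] (cur.reverse :: acc) := by
          simp [PySem.Chars.splitOn.go, hpre]
        rw [this]
        simp only [List.drop_succ_cons, List.drop_zero]
        rw [ih fuel [] (cur.reverse :: acc) (by simpa using Nat.lt_of_succ_lt_succ h)]
        simp only [pvSp, if_pos rfl]
        cases hsp : pvSp t with
        | nil => exact absurd hsp (pvSp_ne_nil t)
        | cons p ps => simp
      · have hpre : List.isPrefixOf ['1'] (c :: t) = false := by
          simp [List.isPrefixOf, Ne.symm hc]
        have : PySem.Chars.splitOn.go ['1'] (fuel + 1) (c :: t) cur acc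
            = PySem.Chars.splitOn.go ['1'] fuel t (c :: cur) acc := by
          simp [PySem.Chars.splitOn.go, hpre]
        rw [this, ih fuel (c :: cur) acc (by simpa using Nat.lt_of_succ_lt_succ h)]
        simp only [pvSp, if_neg hc]
        cases hsp : pvSp t with
        | nil => exact absurd hsp (pvSp_ne_nil t)
        | cons p ps => simp

theorem splitOn_one (l : List Char) : PySem.Chars.splitOn l ['1'] = pvSp l := by
  have h := splitOn_go_one l (l.length + 1) [] [] (Nat.lt_succ_self _)
  rw [show PySem.Chars.splitOn l ['1'] = PySem.Chars.splitOn.go ['1'] (l.length + 1) l [] [] from rfl, h]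
  cases hsp : pvSp l with
  | nil => exact absurd hsp (pvSp_ne_nil l)
  | cons p ps => simp

-- pvSp produces count('1') + 1 parts …
theorem pvSp_length (l : List Char) : (pvSp l).length = l.count '1' + 1 := by
  induction l with
  | nil => simp [pvSp]
  | cons c t ih =>
    by_cases hc : c = '1'
    · subst hc; simp [pvSp, ih, List.count_cons]
    · simp only [pvSp, if_neg hc]
      cases hsp : pvSp t with
      | nil => exact absurd hsp (pvSp_ne_nil t)
      | cons p ps =>
        rw [hsp] at ih
        simp only [List.length_cons] at ih ⊢
        simp [List.count_cons, ih, hc]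

-- … which together hold exactly the non-'1' characters.
theorem pvSp_sum (l : List Char) :
    ((pvSp l).map (fun p => (p.length : Int))).sum = (l.length : Int) - l.count '1' := by
  induction l with
  | nil => simp [pvSp]
  | cons c t ih =>
    by_cases hc : c = '1'
    · subst hc
      show (List.map (fun p => ((p.length : Int))) ([] :: pvSp t)).sum
          = ((('1' :: t).length : Int)) - (('1' :: t).count '1' : Int)
      have hcnt : List.count '1' ('1' :: t) = t.count '1' + 1 := by simp
      rw [List.map_cons, List.sum_cons, ih, hcnt, List.length_cons]
      simp
    · simp only [pvSp, if_neg hc]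
      cases hsp : pvSp t with
      | nil => exact absurd hsp (pvSp_ne_nil t)
      | cons p ps =>
        rw [hsp] at ih
        simp only [List.map_cons, List.sum_cons, List.length_cons] at ih ⊢
        have hcnt : (c :: t).count '1' = t.count '1' := by
          simp [List.count_cons, hc]
        rw [hcnt]
        push_cast at ih ⊢
        omega

-- A's loop, expressed over the character list: the pair is (count of '1', count of rest).
theorem loop_pair (l : List Char) : ∀ (a b : Int),
    (l.foldl (fun (acc : Int × Int) ch =>
        if ch == '1' then (acc.1 + 1, acc.2) else (acc.1, acc.2 + 1)) (a, b))
      = (a + l.count '1', b + (l.length - l.count '1')) := by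
  induction l with
  | nil => intro a b; simp
  | cons h t ih =>
    intro a b
    rw [List.foldl_cons]
    by_cases hc : (h == '1') = true
    · have hcnt : List.count '1' (h :: t) = List.count '1' t + 1 := by
        simp at hc; simp [hc]
      rw [if_pos hc, show (((a, b).1 + 1 : Int), ((a, b).2 : Int)) = (a + 1, b) from rfl,
        ih, hcnt, List.length_cons]
      refine Prod.ext ?_ ?_ <;> push_cast <;> ring
    · have hcnt : List.count '1' (h :: t) = List.count '1' t := by
        simp at hc; simp [List.count_cons]; exact hc
      rw [if_neg hc, show (((a, b).1 : Int), ((a, b).2 + 1 : Int)) = (a, b + 1) from rfl,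
        ih, hcnt, List.length_cons]
      refine Prod.ext ?_ ?_ <;> push_cast <;> ring

-- ===== VERDICT (by name: the statement is the Claim_ definition above) =====
theorem ocurrencias_spec : Claim_equal_ocurrencias := by
  intro s _
  unfold Spec_ocurrencias ocurrencias ocurrencias_alt
  have hlen := PySem.Str.len_eq s
  rw [hlen]
  rw [PySem.List.foldl_pyRange_zero_pyGetD' s.toList ' '
    (fun (acc : Int × Int) ch => if ch == '1' then (acc.1 + 1, acc.2) else (acc.1, acc.2 + 1)) (0, 0)]
  rw [loop_pair]
  have h1 : "1".toList = ['1'] := rfl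
  simp only [h1, splitOn_one, pvSp_length, pvSp_sum]
  have hle := List.count_le_length (l := s.toList) (a := '1')
  push_cast
  omega
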